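-- pv_equiv track=rewrite | github.com/ida-mdc/pixel-patrol | packages/pixel-patrol-base/src/pixel_patrol_base/report/data_utils.py | get_dim_aware_column
-- ===== SOURCE A (Python) =====
-- from typing import List, Tuple, Dict, Optional, Sequence
--
-- def find_best_matching_column(
--         columns: List[str],
--         base: str,
--         selections: Dict[str, str]
-- ) -> Optional[str]:
--     """
--     Finds the specific column name (e.g., 'mean_intensity_t0') based on user dropdown selections.
--     """
--     candidates = [c for c in columns if c.startswith(base)]
--     if not candidates:
--         return None
--
--     # Filter candidates to ensure they contain the selected tokens
--     for dim, val in selections.items():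
--         if val and val != "All":
--             # Global controls send indices ("0"), local legacy sends tokens ("t0")
--             # We construct the token ensuring it starts with the dimension letter
--             token = val
--             if not token.startswith(dim):
--                 token = f"{dim}{val}"
--
--             # The column matches if it contains "_t0" (for example)
--             candidates = [c for c in candidates if f"_{token}" in c]
--
--     if candidates:
--         return min(candidates, key=len)
--     return None
--
-- def get_dim_aware_column(
--     all_columns: list[str],
--     base: str,
--     dims_selection: dict | None,
-- ):
--     """
--     - If user did NOT filter dimensions (all 'All'): return the base metric column if it exists.
--     - If user DID filter dimensions: return a matching dim-specific column if found, else None.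
--     """
--     dims_selection = dims_selection or {}
--
--     # True if the user selected ANY concrete dimension instead of "All"
--     is_any_dim_filter = any(
--         value and value != "All"
--         for value in dims_selection.values()
--     )
--
--     if not is_any_dim_filter:
--         return base if base in all_columns else None
--
--     col = find_best_matching_column(all_columns, base, dims_selection)
--     return col  # None means: no data for these dims
-- ===== SOURCE B (Python) =====
-- def get_dim_aware_column(all_columns, base, dims_selection):
--     tokens = [
--         val if val.startswith(dim) else f"{dim}{val}"
--         for dim, val in (dims_selection or {}).items()
--         if val and val != "All"
--     ]
--     if not tokens:
--         return base if base in all_columns else None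
--     # stable sort by length, then return the FIRST matching column:
--     # shortest match overall, earliest original position among equal lengths
--     for c in sorted(all_columns, key=len):
--         if c.startswith(base) and all(f"_{t}" in c for t in tokens):
--             return c
--     return None
-- ===== Notes on version B (the rewrite author's own statement) =====
-- stated objective: alternative
-- what changed: Replaces A's filter-candidates-then-min(key=len) selection (with per-dimension repeated narrowing passes) with gather-tokens-once, then a stable sort of all_columns by length followed by an early-return scan for the first matching column.
import Mathlib
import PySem

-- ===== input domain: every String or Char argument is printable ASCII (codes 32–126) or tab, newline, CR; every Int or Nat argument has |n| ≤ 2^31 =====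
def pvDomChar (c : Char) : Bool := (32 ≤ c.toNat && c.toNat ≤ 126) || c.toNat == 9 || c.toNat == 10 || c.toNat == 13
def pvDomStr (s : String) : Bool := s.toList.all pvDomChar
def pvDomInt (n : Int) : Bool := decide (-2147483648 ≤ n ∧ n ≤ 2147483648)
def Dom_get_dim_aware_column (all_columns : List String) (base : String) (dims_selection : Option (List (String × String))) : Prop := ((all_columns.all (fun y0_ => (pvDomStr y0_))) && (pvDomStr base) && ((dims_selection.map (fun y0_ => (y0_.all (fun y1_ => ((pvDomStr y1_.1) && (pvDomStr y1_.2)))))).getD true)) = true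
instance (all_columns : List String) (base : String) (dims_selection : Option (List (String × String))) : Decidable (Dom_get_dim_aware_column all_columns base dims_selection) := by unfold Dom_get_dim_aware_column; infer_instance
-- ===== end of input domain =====

-- B gathers the required dimension tokens once, then stably sorts all_columns by length and
-- returns the first matching column (sort-then-scan instead of A's narrowing filters + min).


-- ===== PORT A =====
-- Port of A; the Python receives dims_selection as a dict, so the association list
-- is read through PySem.Dict.ofList (duplicate keys overwrite, as in Python).
def find_best_matching_column (columns : List String) (base : String) (selections : PySem.Dict String String) : Option String :=
  let candidates := columns.filter (fun c => PySem.Str.startswith c base)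
  if candidates.isEmpty then none
  else
    let candidates := selections.items.foldl
      (fun cand kv =>
        if kv.2 ≠ "" ∧ kv.2 ≠ "All" then
          let token := if PySem.Str.startswith kv.2 kv.1 then kv.2 else kv.1 ++ kv.2
          cand.filter (fun c => PySem.Str.isIn ("_" ++ token) c)
        else cand)
      candidates
    if candidates.isEmpty then none
    else PySem.List.min? candidates PySem.Str.len

def get_dim_aware_column (all_columns : List String) (base : String) (dims_selection : Option (List (String × String))) : Option String :=
  let d := PySem.Dict.ofList (dims_selection.getD [])
  let is_any_dim_filter := d.items.any (fun kv => kv.2 ≠ "" ∧ kv.2 ≠ "All")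
  if ¬ is_any_dim_filter then
    if all_columns.contains base then some base else none
  else
    find_best_matching_column all_columns base d

-- ===== PORT B =====
-- B: gather the tokens, then stably sort all_columns by length and return the first match.
def get_dim_aware_column_alt (all_columns : List String) (base : String) (dims_selection : Option (List (String × String))) : Option String :=
  let tokens := (PySem.Dict.ofList (dims_selection.getD [])).items.filterMap
    (fun kv =>
      if kv.2 ≠ "" ∧ kv.2 ≠ "All" then
        some (if PySem.Str.startswith kv.2 kv.1 then kv.2 else kv.1 ++ kv.2)
      else none)
  if tokens.isEmpty then
    if all_columns.contains base then some base else none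
  else
    (PySem.List.sorted all_columns PySem.Str.len false).find?
      (fun c => PySem.Str.startswith c base && tokens.all (fun t => PySem.Str.isIn ("_" ++ t) c))

-- ===== PRECONDITION & SPEC =====
def Spec_get_dim_aware_column (all_columns : List String) (base : String) (dims_selection : Option (List (String × String))) (out : Option String) : Prop := out = get_dim_aware_column_alt all_columns base dims_selection
instance (all_columns : List String) (base : String) (dims_selection : Option (List (String × String))) (out : Option String) : Decidable (Spec_get_dim_aware_column all_columns base dims_selection out) := by unfold Spec_get_dim_aware_column; infer_instance

-- ===== CLAIM (what is proved, stated in full; the proofs are below) =====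
def Claim_equal_get_dim_aware_column : Prop := ∀ (all_columns : List String) (base : String) (dims_selection : Option (List (String × String))), Dom_get_dim_aware_column all_columns base dims_selection → Spec_get_dim_aware_column all_columns base dims_selection (get_dim_aware_column all_columns base dims_selection)

-- ===== LEMMAS AND PROOFS =====
-- A's chain of narrowing filters over the items equals one filter by `all tokens`
lemma pv_chain (items : List (String × String)) (init : List String) :
    items.foldl
      (fun cand kv =>
        if kv.2 ≠ "" ∧ kv.2 ≠ "All" then
          let token := if PySem.Str.startswith kv.2 kv.1 then kv.2 else kv.1 ++ kv.2
          cand.filter (fun c => PySem.Str.isIn ("_" ++ token) c)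
        else cand)
      init
    = init.filter (fun c =>
        (items.filterMap (fun kv =>
          if kv.2 ≠ "" ∧ kv.2 ≠ "All" then
            some (if PySem.Str.startswith kv.2 kv.1 then kv.2 else kv.1 ++ kv.2)
          else none)).all (fun t => PySem.Str.isIn ("_" ++ t) c)) := by
  induction items generalizing init with
  | nil => simp
  | cons kv rest ih =>
    by_cases h : kv.2 ≠ "" ∧ kv.2 ≠ "All"
    · simp only [List.foldl_cons, List.filterMap_cons, if_pos h]
      rw [ih, List.filter_filter]
      apply List.filter_congr
      intro c _
      simp [List.all_cons, Bool.and_comm]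
    · simp only [List.foldl_cons, List.filterMap_cons, if_neg h]
      exact ih init

-- any concrete selection exists iff the token list is nonempty
lemma pv_any_iff (items : List (String × String)) :
    items.any (fun kv => decide (kv.2 ≠ "" ∧ kv.2 ≠ "All")) = true ↔
      items.filterMap (fun kv =>
        if kv.2 ≠ "" ∧ kv.2 ≠ "All" then
          some (if PySem.Str.startswith kv.2 kv.1 then kv.2 else kv.1 ++ kv.2)
        else none) ≠ [] := by
  rw [List.any_eq_true, Ne, List.filterMap_eq_nil_iff]
  constructor
  · rintro ⟨kv, hmem, hkv⟩ hall
    have := hall kv hmem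
    rw [if_pos (by simpa using hkv)] at this
    simp at this
  · intro hne
    by_contra hall
    apply hne
    intro kv hmem
    rw [if_neg]
    intro hc
    exact hall ⟨kv, hmem, by simpa using hc⟩

-- inserting an element whose key is strictly below every key in the list puts it in front
lemma pv_insertBy_front {α κ : Type} [LinearOrder κ] (key : α → κ) (x : α) (l : List α)
    (h : ∀ z ∈ l, key x < key z) :
    PySem.List.insertBy (fun a b => decide (key a < key b)) x l = x :: l := by
  cases l with
  | nil => rfl
  | cons y ys =>
    simp [PySem.List.insertBy, h y (by simp)]

-- filtering commutes with inserting into a key-sorted list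
lemma pv_insertBy_filter {α κ : Type} [LinearOrder κ] (key : α → κ) (p : α → Bool) (x : α)
    (l : List α) (hs : l.Pairwise (fun a b => key a ≤ key b)) :
    (PySem.List.insertBy (fun a b => decide (key a < key b)) x l).filter p =
      if p x then PySem.List.insertBy (fun a b => decide (key a < key b)) x (l.filter p)
      else l.filter p := by
  induction l with
  | nil => cases hpx : p x <;> simp [PySem.List.insertBy, hpx]
  | cons y ys ih =>
    rcases List.pairwise_cons.mp hs with ⟨hy, hys⟩
    by_cases hlt : key x < key y
    · rw [show PySem.List.insertBy (fun a b => decide (key a < key b)) x (y :: ys)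
            = x :: y :: ys by simp [PySem.List.insertBy, hlt]]
      cases hpx : p x
      · simp [List.filter_cons, hpx]
      · have hfront : PySem.List.insertBy (fun a b => decide (key a < key b)) x
            ((y :: ys).filter p) = x :: (y :: ys).filter p :=
          pv_insertBy_front key x _ (by
            intro z hz
            rcases List.mem_cons.mp (List.mem_of_mem_filter hz) with rfl | hz'
            · exact hlt
            · exact lt_of_lt_of_le hlt (hy z hz'))
        rw [if_pos rfl, hfront]
        simp [List.filter_cons, hpx]
    · rw [show PySem.List.insertBy (fun a b => decide (key a < key b)) x (y :: ys)
            = y :: PySem.List.insertBy (fun a b => decide (key a < key b)) x ys by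
          simp [PySem.List.insertBy, hlt]]
      cases hpy : p y
      · simpa [List.filter_cons, hpy] using ih hys
      · cases hpx : p x
        · simpa [List.filter_cons, hpy, hpx] using ih hys
        · simp only [List.filter_cons, hpy, if_pos]
          rw [show PySem.List.insertBy (fun a b => decide (key a < key b)) x (y :: ys.filter p)
                = y :: PySem.List.insertBy (fun a b => decide (key a < key b)) x (ys.filter p) by
              simp [PySem.List.insertBy, hlt]]
          have := ih hys
          rw [hpx] at this
          simp only [if_pos] at this
          rw [this]

-- filtering commutes with the stable sort
lemma pv_filter_sorted {α κ : Type} [LinearOrder κ] (key : α → κ) (p : α → Bool) (xs : List α) :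
    (PySem.List.sorted xs key false).filter p = PySem.List.sorted (xs.filter p) key false := by
  induction xs using List.reverseRecOn with
  | nil => simp [PySem.List.sorted]
  | append_singleton xs x ih =>
    rw [PySem.List.sorted_eq_foldl_insertBy, List.foldl_append, ← PySem.List.sorted_eq_foldl_insertBy]
    simp only [List.foldl_cons, List.foldl_nil]
    rw [pv_insertBy_filter key p x _ (PySem.List.sorted_pairwise xs key), ih]
    cases hpx : p x
    · simp [List.filter_append, hpx]
    · simp only [List.filter_append, hpx, if_pos, List.filter_cons, List.filter_nil]
      rw [PySem.List.sorted_eq_foldl_insertBy (xs.filter p ++ [x]), List.foldl_append,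
        ← PySem.List.sorted_eq_foldl_insertBy]
      simp

-- first-minimal element = head of the stable sort
lemma pv_min?_sorted {α κ : Type} [LinearOrder κ] (key : α → κ) (xs : List α) :
    PySem.List.min? xs key = (PySem.List.sorted xs key false).head? := by
  induction xs using List.reverseRecOn with
  | nil => rfl
  | append_singleton xs x ih =>
    rw [PySem.List.sorted_eq_foldl_insertBy, List.foldl_append, ← PySem.List.sorted_eq_foldl_insertBy]
    simp only [List.foldl_cons, List.foldl_nil]
    show (List.foldl _ none (xs ++ [x])) = _
    rw [List.foldl_append]
    simp only [List.foldl_cons, List.foldl_nil]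
    change (match PySem.List.min? xs key with
      | none => some x
      | some m => if key x < key m then some x else some m) = _
    rw [ih]
    cases hs : PySem.List.sorted xs key false with
    | nil => simp [PySem.List.insertBy]
    | cons h t =>
      by_cases hlt : key x < key h
      · simp [PySem.List.insertBy, hlt]
      · simp [PySem.List.insertBy, hlt]

-- min-by-key over the matches = first match in the stable sort by key
lemma pv_min_filter_eq_find {α κ : Type} [LinearOrder κ] (key : α → κ) (p : α → Bool)
    (xs : List α) :
    PySem.List.min? (xs.filter p) key = (PySem.List.sorted xs key false).find? p := by
  rw [pv_min?_sorted, ← pv_filter_sorted, List.head?_filter]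

-- ===== VERDICT (by name: the statement is the Claim_ definition above) =====
theorem get_dim_aware_column_spec : Claim_equal_get_dim_aware_column := by
  intro all_columns base dims_selection _
  unfold Spec_get_dim_aware_column get_dim_aware_column get_dim_aware_column_alt find_best_matching_column
  simp only []
  rw [pv_chain]
  by_cases h : (PySem.Dict.ofList (dims_selection.getD [])).items.filterMap
      (fun kv =>
        if kv.2 ≠ "" ∧ kv.2 ≠ "All" then
          some (if PySem.Str.startswith kv.2 kv.1 then kv.2 else kv.1 ++ kv.2)
        else none) = []
  · have hanyF : ((PySem.Dict.ofList (dims_selection.getD [])).items.any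
        (fun kv => decide (kv.2 ≠ "" ∧ kv.2 ≠ "All"))) = false := by
      rw [Bool.eq_false_iff, Ne, pv_any_iff]
      simpa using h
    rw [h, hanyF]
    simp
  · have hanyT : ((PySem.Dict.ofList (dims_selection.getD [])).items.any
        (fun kv => decide (kv.2 ≠ "" ∧ kv.2 ≠ "All"))) = true :=
      (pv_any_iff _).mpr h
    have hne : ((PySem.Dict.ofList (dims_selection.getD [])).items.filterMap
        (fun kv =>
          if kv.2 ≠ "" ∧ kv.2 ≠ "All" then
            some (if PySem.Str.startswith kv.2 kv.1 then kv.2 else kv.1 ++ kv.2)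
          else none)).isEmpty = false := by
      simpa [List.isEmpty_iff] using h
    have hmerge : (all_columns.filter (fun c => PySem.Str.startswith c base)).filter
          (fun c => ((PySem.Dict.ofList (dims_selection.getD [])).items.filterMap
            (fun kv =>
              if kv.2 ≠ "" ∧ kv.2 ≠ "All" then
                some (if PySem.Str.startswith kv.2 kv.1 then kv.2 else kv.1 ++ kv.2)
              else none)).all (fun t => PySem.Str.isIn ("_" ++ t) c))
        = all_columns.filter
            (fun c => PySem.Str.startswith c base &&
              ((PySem.Dict.ofList (dims_selection.getD [])).items.filterMap
                (fun kv =>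
                  if kv.2 ≠ "" ∧ kv.2 ≠ "All" then
                    some (if PySem.Str.startswith kv.2 kv.1 then kv.2 else kv.1 ++ kv.2)
                  else none)).all (fun t => PySem.Str.isIn ("_" ++ t) c)) := by
      rw [List.filter_filter]
      apply List.filter_congr
      intro c _
      exact Bool.and_comm _ _
    rw [hanyT, hne]
    simp only [Bool.false_eq_true, if_false, not_true_eq_false]
    rw [← pv_min_filter_eq_find PySem.Str.len _ all_columns, ← hmerge]
    by_cases h0 : all_columns.filter (fun c => PySem.Str.startswith c base) = []
    · rw [h0]
      simp [PySem.List.min?]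
    · have h0' : (all_columns.filter (fun c => PySem.Str.startswith c base)).isEmpty = false := by
        simpa [List.isEmpty_iff] using h0
      rw [h0']
      simp only [Bool.false_eq_true, if_false]
      by_cases h1 : ((all_columns.filter (fun c => PySem.Str.startswith c base)).filter
          (fun c => ((PySem.Dict.ofList (dims_selection.getD [])).items.filterMap
            (fun kv =>
              if kv.2 ≠ "" ∧ kv.2 ≠ "All" then
                some (if PySem.Str.startswith kv.2 kv.1 then kv.2 else kv.1 ++ kv.2)
              else none)).all (fun t => PySem.Str.isIn ("_" ++ t) c))) = []
      · rw [h1]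
        simp [PySem.List.min?]
      · have h1' := (Bool.eq_false_iff).mpr (fun hc => h1 (List.isEmpty_iff.mp hc))
        rw [h1']
        simp
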